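-- pv_equiv track=rewrite | github.com/TheMightyJew/EA_Assignment2 | Robot_Maze.py | num_of_dups
-- ===== SOURCE A (Python) =====
-- def num_of_dups(path):
--     dic ={}
--     for loc in path:
--         if loc in dic:
--             dic[loc] = dic[loc]+1
--         else:
--             dic[loc] = 0
--     sum = 0
--     for key in dic:
--         sum += dic[key]
--     return sum
-- ===== SOURCE B (Python) =====
-- def num_of_dups(path):
--     return len(path) - len(set(path))
-- ===== Notes on version B (the rewrite author's own statement) =====
-- stated objective: simpler
-- what changed: Closed form: total length minus number of distinct locations (len(path) - len(set(path))), replacing A's explicit loop that builds a dict of per-location counts and its second loop summing them.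
import Mathlib
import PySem

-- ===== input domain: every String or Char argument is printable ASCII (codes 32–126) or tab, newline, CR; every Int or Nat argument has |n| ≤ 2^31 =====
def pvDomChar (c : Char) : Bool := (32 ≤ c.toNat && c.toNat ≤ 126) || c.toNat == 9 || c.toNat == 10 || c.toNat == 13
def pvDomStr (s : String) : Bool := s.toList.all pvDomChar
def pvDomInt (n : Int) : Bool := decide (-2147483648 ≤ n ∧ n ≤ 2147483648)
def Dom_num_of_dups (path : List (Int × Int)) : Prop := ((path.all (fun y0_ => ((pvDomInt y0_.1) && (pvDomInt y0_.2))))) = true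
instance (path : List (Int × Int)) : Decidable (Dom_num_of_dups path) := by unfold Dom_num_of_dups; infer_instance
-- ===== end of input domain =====

-- B replaces A's dict-of-counts-then-sum loops with the closed form len(path) - len(set(path)) (simpler).

-- ===== PORT A =====
def num_of_dups (path : List (Int × Int)) : Int :=
  let dic := path.foldl
    (fun d loc =>
      if d.contains loc then d.insert loc (d.getD loc 0 + 1) else d.insert loc 0)
    (PySem.Dict.empty : PySem.Dict (Int × Int) Int)
  dic.keys.foldl (fun s k => s + dic.getD k 0) 0

-- ===== PORT B =====
def num_of_dups_alt (path : List (Int × Int)) : Int :=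
  (path.length : Int) - ((PySem.Set.ofList path).length : Int)

-- ===== PRECONDITION & SPEC =====
def Spec_num_of_dups (path : List (Int × Int)) (out : Int) : Prop := out = num_of_dups_alt path
instance (path : List (Int × Int)) (out : Int) : Decidable (Spec_num_of_dups path out) := by unfold Spec_num_of_dups; infer_instance

-- ===== CLAIM (what is proved, stated in full; the proofs are below) =====
def Claim_equal_num_of_dups : Prop := ∀ (path : List (Int × Int)), Dom_num_of_dups path → Spec_num_of_dups path (num_of_dups path)

-- ===== LEMMAS AND PROOFS =====

-- sum over the values of a dict: what A's second loop computes
def pvSumVals (d : PySem.Dict (Int × Int) Int) : Int :=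
  (d.keys.map (fun k => d.getD k 0)).sum

-- bumping one key's value in a Nodup key list raises the mapped sum by 1
lemma pv_sum_map_bump {α : Type} [DecidableEq α] (l : List α) (x : α) (f : α → Int)
    (hnd : l.Nodup) (hx : x ∈ l) :
    (l.map (fun k => if k = x then f k + 1 else f k)).sum = (l.map f).sum + 1 := by
  induction l with
  | nil => cases hx
  | cons a l ih =>
    have ha : a ∉ l := (List.nodup_cons.mp hnd).1
    have hl : l.Nodup := (List.nodup_cons.mp hnd).2
    by_cases hax : a = x
    · subst hax
      have hmap : (l.map (fun k => if k = a then f k + 1 else f k)) = l.map f := by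
        apply List.map_congr_left
        intro y hy
        have : y ≠ a := fun e => ha (e ▸ hy)
        simp [this]
      simp only [List.map_cons, List.sum_cons, hmap, ite_true]
      omega
    · have hx' : x ∈ l := by
        rcases List.mem_cons.mp hx with h | h
        · exact absurd h.symm hax
        · exact h
      simp only [List.map_cons, List.sum_cons, ih hl hx', if_neg hax]
      omega

-- loop invariant for A's first loop: value-sum plus key-count grows by 1 per element
lemma pv_main (l : List (Int × Int)) :
    ∀ (d : PySem.Dict (Int × Int) Int), d.keys.Nodup →
      pvSumVals
        (l.foldl
          (fun d loc =>
            if d.contains loc then d.insert loc (d.getD loc 0 + 1) else d.insert loc 0) d)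
      + ((l.foldl
          (fun d loc =>
            if d.contains loc then d.insert loc (d.getD loc 0 + 1) else d.insert loc 0) d).keys.length : Int)
      = pvSumVals d + (d.keys.length : Int) + (l.length : Int) := by
  induction l with
  | nil => intro d _; simp
  | cons x l ih =>
    intro d hnd
    by_cases hc : d.contains x = true
    · have hmem : x ∈ d.keys := (PySem.Dict.contains_iff_mem_keys d x).mp hc
      have hkeys : (d.insert x (d.getD x 0 + 1)).keys = d.keys :=
        PySem.Dict.keys_insert_of_contains d _ hc
      have hsum : pvSumVals (d.insert x (d.getD x 0 + 1)) = pvSumVals d + 1 := by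
        unfold pvSumVals
        rw [hkeys]
        have hmap : d.keys.map (fun k => (d.insert x (d.getD x 0 + 1)).getD k 0)
            = d.keys.map (fun k => if k = x then d.getD k 0 + 1 else d.getD k 0) := by
          apply List.map_congr_left
          intro k _
          rw [PySem.Dict.getD_insert]
          by_cases hk : k = x <;> simp [hk]
        rw [hmap, pv_sum_map_bump d.keys x (fun k => d.getD k 0) hnd hmem]
      have hnd' : (d.insert x (d.getD x 0 + 1)).keys.Nodup := by rw [hkeys]; exact hnd
      simp only [List.foldl_cons, hc, if_true]
      rw [ih _ hnd', hkeys, hsum]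
      simp
      omega
    · have hc' : d.contains x = false := by simpa using hc
      have hmem : x ∉ d.keys := fun h => hc ((PySem.Dict.contains_iff_mem_keys d x).mpr h)
      have hkeys : (d.insert x 0).keys = d.keys ++ [x] :=
        PySem.Dict.keys_insert_of_not_contains d _ hc'
      have hnd' : (d.insert x 0).keys.Nodup := by
        rw [hkeys]
        refine List.Nodup.append hnd (List.nodup_singleton x) ?_
        intro y hy hy'
        simp only [List.mem_singleton] at hy'
        exact hmem (hy' ▸ hy)
      have hsum : pvSumVals (d.insert x 0) = pvSumVals d := by
        unfold pvSumVals
        rw [hkeys, List.map_append, List.sum_append]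
        have hmap : d.keys.map (fun k => (d.insert x 0).getD k 0)
            = d.keys.map (fun k => d.getD k 0) := by
          apply List.map_congr_left
          intro k hk
          have : k ≠ x := fun e => hmem (e ▸ hk)
          rw [PySem.Dict.getD_insert]
          simp [this]
        rw [hmap]
        simp [PySem.Dict.getD_insert]
      simp only [List.foldl_cons, hc', Bool.false_eq_true, if_false]
      rw [ih _ hnd', hkeys]
      simp
      omega

-- the keys of A's dict are exactly set(path)
lemma pv_keys (path : List (Int × Int)) :
    (path.foldl
      (fun d loc =>
        if d.contains loc then d.insert loc (d.getD loc 0 + 1) else d.insert loc 0)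
      (PySem.Dict.empty : PySem.Dict (Int × Int) Int)).keys
    = PySem.Set.ofList path := by
  have hstep : (fun (d : PySem.Dict (Int × Int) Int) loc =>
        if d.contains loc then d.insert loc (d.getD loc 0 + 1) else d.insert loc 0)
      = (fun d loc => d.insert loc (if d.contains loc then d.getD loc 0 + 1 else 0)) := by
    funext d loc
    by_cases hc : d.contains loc <;> simp [hc]
  rw [hstep, PySem.Dict.keys_foldl_insert]
  simp [PySem.Dict.keys_empty, PySem.Set.update_nil_left]

-- ===== VERDICT (by name: the statement is the Claim_ definition above) =====
theorem num_of_dups_spec : Claim_equal_num_of_dups := by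
  intro path _
  unfold Spec_num_of_dups num_of_dups num_of_dups_alt
  have hF : ∀ (d : PySem.Dict (Int × Int) Int),
      d.keys.foldl (fun s k => s + d.getD k 0) 0 = pvSumVals d := by
    intro d
    unfold pvSumVals
    simpa using PySem.List.foldl_add d.keys (fun k => d.getD k 0) 0
  rw [hF]
  have h := pv_main path (PySem.Dict.empty : PySem.Dict (Int × Int) Int)
    (by simp [PySem.Dict.keys_empty])
  rw [pv_keys] at h
  have h0 : pvSumVals (PySem.Dict.empty : PySem.Dict (Int × Int) Int) = 0 := by
    simp [pvSumVals, PySem.Dict.keys_empty]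
  have h1 : ((PySem.Dict.empty : PySem.Dict (Int × Int) Int).keys.length : Int) = 0 := by
    simp [PySem.Dict.keys_empty]
  rw [h0, h1] at h
  omega
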